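-- pv_equiv track=rewrite | github.com/Asif9060/Web-Scraper | src/web_intel/query_parser/parser.py | _looks_like_question
-- ===== SOURCE A (Python) =====
-- def _looks_like_question(text: str) -> bool:
--     """Check if text appears to be a question."""
--     text_lower = text.lower()
--     question_starters = [
--         "what", "where", "when", "why", "how", "who", "which",
--         "is", "are", "was", "were", "do", "does", "did",
--         "can", "could", "will", "would", "should", "has", "have",
--     ]
--     return any(text_lower.startswith(w + " ") for w in question_starters)
-- ===== SOURCE B (Python) =====
-- _QUESTION_STARTERS = frozenset((
--     "what", "where", "when", "why", "how", "who", "which",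
--     "is", "are", "was", "were", "do", "does", "did",
--     "can", "could", "will", "would", "should", "has", "have",
-- ))
--
--
-- def _looks_like_question(text: str) -> bool:
--     """Check if text appears to be a question."""
--     head = []
--     for ch in text:
--         if ch == ' ':
--             return ''.join(head) in _QUESTION_STARTERS
--         head.append(ch.lower())
--     return False
-- ===== Notes on version B (the rewrite author's own statement) =====
-- stated objective: alternative
-- what changed: A tests the whole lowered text against each of 21 starter-word prefixes; B instead scans once up to the first space, lowercasing as it goes, and does one frozenset membership test on that first word (no space means False), trading the 21 prefix comparisons for a single first-token extraction and hash lookup.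
import Mathlib
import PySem

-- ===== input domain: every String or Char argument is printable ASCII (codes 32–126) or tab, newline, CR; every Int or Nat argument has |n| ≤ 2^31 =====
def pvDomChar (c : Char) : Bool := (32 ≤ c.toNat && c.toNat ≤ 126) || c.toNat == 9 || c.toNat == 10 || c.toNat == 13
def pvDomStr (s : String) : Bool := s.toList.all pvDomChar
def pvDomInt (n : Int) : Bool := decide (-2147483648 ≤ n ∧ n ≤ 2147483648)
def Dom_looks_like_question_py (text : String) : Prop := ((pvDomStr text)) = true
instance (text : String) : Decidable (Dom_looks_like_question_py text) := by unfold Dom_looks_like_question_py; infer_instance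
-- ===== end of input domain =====

-- B replaces A's scan over 21 starter-word prefixes by a single pass to the first space
-- and one set-membership test on that first word (objective: alternative).

-- ===== PORT A =====
def pvQuestionStarters : List String :=
  ["what", "where", "when", "why", "how", "who", "which",
   "is", "are", "was", "were", "do", "does", "did",
   "can", "could", "will", "would", "should", "has", "have"]

def looks_like_question_py (text : String) : Bool :=
  let text_lower := PySem.Str.lower text
  pvQuestionStarters.any (fun w => PySem.Str.startswith text_lower (w ++ " "))

-- ===== PORT B =====
def pvStarters : PySem.Set (List Char) :=
  PySem.Set.ofList
    ["what".toList, "where".toList, "when".toList, "why".toList, "how".toList,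
     "who".toList, "which".toList, "is".toList, "are".toList, "was".toList,
     "were".toList, "do".toList, "does".toList, "did".toList, "can".toList,
     "could".toList, "will".toList, "would".toList, "should".toList,
     "has".toList, "have".toList]

-- the for-loop of B: accumulate the lowered first word, decide at the first space
def pvAltGo (acc : List Char) : List Char → Bool
  | [] => false
  | c :: rest =>
      if c = ' ' then pvStarters.contains acc
      else pvAltGo (acc ++ [PySem.Chars.lowerChar c]) rest

def looks_like_question_py_alt (text : String) : Bool :=
  pvAltGo [] text.toList

-- ===== PRECONDITION & SPEC =====
def Spec_looks_like_question_py (text : String) (out : Bool) : Prop := out = looks_like_question_py_alt text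
instance (text : String) (out : Bool) : Decidable (Spec_looks_like_question_py text out) := by unfold Spec_looks_like_question_py; infer_instance

-- ===== CLAIM (what is proved, stated in full; the proofs are below) =====
def Claim_equal_looks_like_question_py : Prop := ∀ (text : String), Dom_looks_like_question_py text → Spec_looks_like_question_py text (looks_like_question_py text)

-- ===== LEMMAS AND PROOFS =====

-- the starter words, as char lists (proof-side mirror of the two literal lists)
def pvStartersChars : List (List Char) :=
  [['w', 'h', 'a', 't'], ['w', 'h', 'e', 'r', 'e'], ['w', 'h', 'e', 'n'],
   ['w', 'h', 'y'], ['h', 'o', 'w'], ['w', 'h', 'o'], ['w', 'h', 'i', 'c', 'h'],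
   ['i', 's'], ['a', 'r', 'e'], ['w', 'a', 's'], ['w', 'e', 'r', 'e'],
   ['d', 'o'], ['d', 'o', 'e', 's'], ['d', 'i', 'd'], ['c', 'a', 'n'],
   ['c', 'o', 'u', 'l', 'd'], ['w', 'i', 'l', 'l'], ['w', 'o', 'u', 'l', 'd'],
   ['s', 'h', 'o', 'u', 'l', 'd'], ['h', 'a', 's'], ['h', 'a', 'v', 'e']]

lemma pvStarters_eq : pvStarters = pvStartersChars := by decide

lemma pvStarters_map_eq :
    pvQuestionStarters.map (fun w => (w ++ " ").toList)
      = pvStartersChars.map (fun w => w ++ [' ']) := by decide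

lemma pvStarters_no_space : ∀ w ∈ pvStartersChars, ' ' ∉ w := by decide

-- a "word + space" pattern never prefixes a space-free string
lemma startswith_false_of_no_space (w l : List Char) (h : ' ' ∉ l) :
    PySem.Chars.startswith l (w ++ [' ']) = false := by
  rw [Bool.eq_false_iff]
  intro hc
  exact h (((PySem.Chars.startswith_iff _ _).1 hc).mem (by simp))

-- "w + space" prefixes "acc + space + t" (both w and acc space-free) iff w = acc
lemma space_prefix_iff (w acc t : List Char) (hw : ' ' ∉ w) (ha : ' ' ∉ acc) :
    (w ++ [' ']) <+: (acc ++ ' ' :: t) ↔ w = acc := by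
  induction w generalizing acc with
  | nil =>
    cases acc with
    | nil => simp
    | cons a as =>
      simp only [List.nil_append, List.cons_append, List.cons_prefix_cons]
      constructor
      · rintro ⟨rfl, -⟩; exact absurd (List.mem_cons_self ..) ha
      · intro h; cases h
  | cons x xs ih =>
    cases acc with
    | nil =>
      simp only [List.cons_append, List.nil_append, List.cons_prefix_cons]
      constructor
      · rintro ⟨rfl, -⟩; exact absurd (List.mem_cons_self ..) hw
      · intro h; cases h
    | cons a as =>
      simp only [List.cons_append, List.cons_prefix_cons]
      have hw' : ' ' ∉ xs := fun h => hw (List.mem_cons_of_mem _ h)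
      have ha' : ' ' ∉ as := fun h => ha (List.mem_cons_of_mem _ h)
      rw [ih as hw' ha']
      constructor
      · rintro ⟨rfl, rfl⟩; rfl
      · intro h; cases h; exact ⟨rfl, rfl⟩

lemma lowerChar_space : PySem.Chars.lowerChar ' ' = ' ' := by decide

lemma lowerChar_ne_space (c : Char) (h : c ≠ ' ') : PySem.Chars.lowerChar c ≠ ' ' := by
  unfold PySem.Chars.lowerChar
  split_ifs with hu
  · simp only [PySem.Chars.isupper, Bool.and_eq_true, decide_eq_true_eq, Char.le_def] at hu
    intro hcontra
    have hb : 65 ≤ c.toNat ∧ c.toNat ≤ 90 := by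
      constructor
      · exact hu.1
      · exact hu.2
    have hv : (c.toNat + 32).isValidChar := Or.inl (by omega)
    have := congrArg Char.toNat hcontra
    rw [Char.toNat_ofNat, if_pos hv] at this
    have : c.toNat + 32 = 32 := this
    omega
  · exact h

-- loop invariant: with acc the (space-free) lowered text consumed so far,
-- A's any-over-starters on the full lowered text equals B's loop on the rest
lemma pvCore (s : List Char) (acc : List Char) (ha : ' ' ∉ acc) :
    pvStartersChars.any
      (fun w => PySem.Chars.startswith (acc ++ s.map PySem.Chars.lowerChar) (w ++ [' ']))
      = pvAltGo acc s := by
  induction s generalizing acc with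
  | nil =>
    simp only [List.map_nil, List.append_nil, pvAltGo]
    rw [List.any_eq_false]
    intro w _
    simp [startswith_false_of_no_space w acc ha]
  | cons c rest ih =>
    by_cases hc : c = ' '
    · subst hc
      simp only [List.map_cons, lowerChar_space, pvAltGo]
      rw [Bool.eq_iff_iff]
      simp only [List.any_eq_true, PySem.Chars.startswith_iff]
      constructor
      · rintro ⟨w, hwmem, hp⟩
        have hw := pvStarters_no_space w hwmem
        have : w = acc := (space_prefix_iff w acc _ hw ha).1 hp
        subst this
        rw [pvStarters_eq]
        exact List.elem_iff.2 hwmem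
      · intro hmem
        have hmem' : acc ∈ pvStartersChars := by
          rw [pvStarters_eq] at hmem; exact List.elem_iff.1 hmem
        exact ⟨acc, hmem', (space_prefix_iff acc acc _ (pvStarters_no_space acc hmem') ha).2 rfl⟩
    · have hl := lowerChar_ne_space c hc
      have ha' : ' ' ∉ acc ++ [PySem.Chars.lowerChar c] := by
        simp [ha]
        exact fun h => hl h.symm
      have := ih (acc ++ [PySem.Chars.lowerChar c]) ha'
      simp only [List.map_cons, pvAltGo, if_neg hc]
      rw [← this, List.append_assoc]
      rfl

-- A's port, rephrased over char lists
lemma pvA_eq (text : String) :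
    looks_like_question_py text
      = pvStartersChars.any
          (fun w => PySem.Chars.startswith (PySem.Chars.lower text.toList) (w ++ [' '])) := by
  simp only [looks_like_question_py, PySem.Str.startswith_eq, PySem.Str.toList_lower]
  rw [show (fun w => PySem.Chars.startswith (PySem.Chars.lower text.toList) (w ++ " ").toList)
        = (fun w => PySem.Chars.startswith (PySem.Chars.lower text.toList) w) ∘
            (fun w : String => (w ++ " ").toList) from rfl,
      ← List.any_map, pvStarters_map_eq, List.any_map]
  rfl

-- ===== VERDICT (by name: the statement is the Claim_ definition above) =====
theorem looks_like_question_py_spec : Claim_equal_looks_like_question_py := by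
  intro text _
  show looks_like_question_py text = looks_like_question_py_alt text
  rw [pvA_eq, looks_like_question_py_alt]
  have := pvCore text.toList [] (by simp)
  simpa [PySem.Chars.lower] using this
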